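-- pv_equiv track=rewrite | github.com/Nouman404/nouman404.github.io | _posts/CTFs/404CTF_2023/Programmation/desMots.py | regle4
-- ===== SOURCE A (Python) =====
-- voyelles = ["a", "e", "i", "o", "u", "y"]
--
-- def getVoyelle(c):
-- 	code = ord(c)
-- 	while 1:
-- 		code -=1
-- 		if chr(code).lower() in voyelles:
-- 			return code
--
-- def mySomme(mot, n):
-- 	somme = 0
-- 	if n == 1:
-- 		if mot[0].lower() in voyelles:
-- 			return ord(mot[0])*2
--
-- 	for i in range((n-1), -1, -1):
-- 		if mot[i].lower() in voyelles:
-- 			somme += ord(mot[i])*(2**(n-i))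
-- 	return somme
--
-- def regle4(mot):
-- 	mot = list(mot)
-- 	n = 0
-- 	while n < len(mot):
-- 		c = mot[n]
-- 		# check if c == consonne
-- 		if c.lower() not in voyelles and c.isalpha():
-- 			vp = getVoyelle(c)
-- 			s = mySomme(mot, n)
-- 			a = ((vp + s) % 95) + 32
-- 			mot.insert((n+1),chr(a))
-- 		n += 1
-- 	return "".join(mot)
-- ===== SOURCE B (Python) =====
-- VOYELLES = "aeiouy"
-- _VCODES = sorted(ord(v) for v in VOYELLES + VOYELLES.upper())
--
--
-- def _prev_vowel(code):
--     # largest vowel code strictly below `code` (exists for every consonant letter)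
--     return max(v for v in _VCODES if v < code)
--
--
-- def regle4(mot):
--     # One pass with the weighted vowel prefix sum kept modulo 95 via
--     # f(next) = 2*(f(cur) + vowel_contribution); inserted characters are
--     # processed on the fly instead of re-scanning the growing list.
--     out = []
--     s = 0
--     for c in mot:
--         while True:
--             out.append(c)
--             if c.lower() in VOYELLES:
--                 s = 2 * (s + ord(c)) % 95
--                 break
--             if not c.isalpha():
--                 s = 2 * s % 95
--                 break
--             nxt = chr((_prev_vowel(ord(c)) + s) % 95 + 32)
--             s = 2 * s % 95
--             c = nxt
--     return "".join(out)
-- ===== Notes on version B (the rewrite author's own statement) =====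
-- stated objective: faster
-- what changed: Instead of mutating the list and recomputing the weighted vowel sum with huge powers of two from scratch at every position (and re-finding the previous vowel by decrementing the code), B does one pass keeping the prefix sum modulo 95 via the recurrence s' = 2*(s+v) mod 95, emits inserted characters on the fly (processing their chains in a small inner loop), and takes the previous vowel as a max over the twelve vowel codes.
import Mathlib
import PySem

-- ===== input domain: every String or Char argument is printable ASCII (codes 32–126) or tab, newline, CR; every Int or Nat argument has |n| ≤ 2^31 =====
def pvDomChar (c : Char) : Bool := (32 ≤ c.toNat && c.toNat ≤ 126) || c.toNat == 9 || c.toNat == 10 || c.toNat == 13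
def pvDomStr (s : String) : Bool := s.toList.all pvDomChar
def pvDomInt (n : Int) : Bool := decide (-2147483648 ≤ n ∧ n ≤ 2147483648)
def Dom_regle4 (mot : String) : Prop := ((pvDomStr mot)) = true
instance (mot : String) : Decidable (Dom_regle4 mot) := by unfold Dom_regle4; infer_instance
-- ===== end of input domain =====

-- B replaces A's quadratic rescans (weighted vowel sums with huge powers of 2, recomputed
-- from the mutated list at every position) by one pass keeping the prefix sum modulo 95.

-- ===== PORT A =====
def voyellesA : List (List Char) := [['a'], ['e'], ['i'], ['o'], ['u'], ['y']]

-- "c.lower() in voyelles" (elements of the Python list are 1-character strings)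
def estVoyelleA (c : Char) : Bool := voyellesA.contains (PySem.Chars.lower [c])

-- getVoyelle's "while 1" loop; fuel = starting code: Python finds a vowel code below every
-- consonant it is called on well before the code reaches 0, so the fuel is never exhausted
def getVoyelleLoopA : Nat → Nat → Nat
  | 0, code => code
  | f + 1, code =>
      let code := code - 1
      if estVoyelleA (Char.ofNat code) then code else getVoyelleLoopA f code

def getVoyelleA (c : Char) : Nat := getVoyelleLoopA c.toNat c.toNat

-- mySomme; the indices i of "for i in range(n-1, -1, -1)" are n-1, …, 0; mot[i] is in range
-- wherever A calls it (n < len(mot)), so the getD default is never read there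
def mySommeA (mot : List Char) (n : Nat) : Nat :=
  if n == 1 && estVoyelleA (mot.getD 0 ' ') then (mot.getD 0 ' ').toNat * 2
  else
    (List.range n).reverse.foldl
      (fun somme i =>
        if estVoyelleA (mot.getD i ' ') then somme + (mot.getD i ' ').toNat * 2 ^ (n - i)
        else somme) 0

-- the "while n < len(mot)" loop; one iteration per character of the final string, so the
-- fuel chosen in regle4 below is never exhausted (each source char spawns ≤ 9 insertions)
def loopA : Nat → List Char → Nat → List Char
  | 0, mot, _ => mot
  | f + 1, mot, n =>
      if h : n < mot.length then
        let c := mot[n]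
        if !estVoyelleA c && PySem.Chars.isalpha c then
          let vp := getVoyelleA c
          let s := mySommeA mot n
          let a := (vp + s) % 95 + 32
          loopA f (PySem.List.insert mot ((n : Int) + 1) (Char.ofNat a)) (n + 1)
        else loopA f mot (n + 1)
      else mot

def regle4 (mot : String) : String := String.ofList (loopA (11 * mot.toList.length + 11) mot.toList 0)

-- ===== PORT B =====
def vcodesB : List Nat := [65, 69, 73, 79, 85, 89, 97, 101, 105, 111, 117, 121]

-- max(v for v in _VCODES if v < code); nonempty for every consonant letter code, so the
-- getD default (Python: ValueError on empty) is never read where B calls it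
def prevVowelB (code : Nat) : Nat :=
  (PySem.List.max? (vcodesB.filter (fun v => v < code)) (fun v => v)).getD 0

-- "c.lower() in VOYELLES" with VOYELLES = "aeiouy"
def estVoyelleB (c : Char) : Bool := PySem.Chars.isIn (PySem.Chars.lower [c]) ['a', 'e', 'i', 'o', 'u', 'y']

-- the inner "while True" chain loop; fuel 10 is never exhausted: on ASCII states an
-- insertion chain ends within 9 steps (clen_le9 below)
def chainB : Nat → List Char → Char → Nat → List Char × Nat
  | 0, out, _, s => (out, s)
  | f + 1, out, c, s =>
      let out := out ++ [c]
      if estVoyelleB c then (out, 2 * (s + c.toNat) % 95)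
      else if !(PySem.Chars.isalpha c) then (out, 2 * s % 95)
      else chainB f out (Char.ofNat ((prevVowelB c.toNat + s) % 95 + 32)) (2 * s % 95)

def regle4_alt (mot : String) : String :=
  String.ofList (mot.toList.foldl (fun (st : List Char × Nat) c => chainB 10 st.1 c st.2) ([], 0)).1

-- ===== PRECONDITION & SPEC =====
def Spec_regle4 (mot : String) (out : String) : Prop := out = regle4_alt mot
instance (mot : String) (out : String) : Decidable (Spec_regle4 mot out) := by unfold Spec_regle4; infer_instance

-- ===== CLAIM (what is proved, stated in full; the proofs are below) =====
def Claim_equal_regle4 : Prop := ∀ (mot : String), Dom_regle4 mot → Spec_regle4 mot (regle4 mot)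

-- ===== LEMMAS AND PROOFS =====

-- code-level (pure Nat) pictures of the character tests, for the finite-state chain analysis
def voyCode (k : Nat) : Bool := [65, 69, 73, 79, 85, 89, 97, 101, 105, 111, 117, 121].contains k
def alphaCode (k : Nat) : Bool := (65 ≤ k && k ≤ 90) || (97 ≤ k && k ≤ 122)
def consCode (k : Nat) : Bool := alphaCode k && !voyCode k
def pvCode (k : Nat) : Nat :=
  if k ≤ 65 then 0 else if k ≤ 69 then 65 else if k ≤ 73 then 69 else if k ≤ 79 then 73
  else if k ≤ 85 then 79 else if k ≤ 89 then 85 else if k ≤ 97 then 89 else if k ≤ 101 then 97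
  else if k ≤ 105 then 101 else if k ≤ 111 then 105 else if k ≤ 117 then 111
  else if k ≤ 121 then 117 else 121
def nxtCode (k s : Nat) : Nat := (pvCode k + s) % 95 + 32

-- length of the insertion chain started by code k with running sum s, truncated at fuel f
def clen : Nat → Nat → Nat → Nat
  | 0, _, _ => 0
  | f + 1, k, s => if consCode k then clen f (nxtCode k s) (2 * s % 95) + 1 else 0

def rank (k s : Nat) : Nat := clen 10 k s
def rankG (k s : Nat) : Nat := if k < 127 then rank k s else 10

set_option maxHeartbeats 1000000 in
set_option maxRecDepth 8000 in
lemma clen_le9 : ∀ k, k < 127 → ∀ s, s < 95 → clen 10 k s ≤ 9 := by decide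

lemma voy_bridgeA : ∀ k, k < 127 → estVoyelleA (Char.ofNat k) = voyCode k := by decide
lemma voy_bridgeB : ∀ k, k < 127 → estVoyelleB (Char.ofNat k) = voyCode k := by decide
lemma alpha_bridge : ∀ k, k < 127 → PySem.Chars.isalpha (Char.ofNat k) = alphaCode k := by decide
lemma pv_bridgeA : ∀ k, k < 127 → consCode k = true → getVoyelleA (Char.ofNat k) = pvCode k := by decide
lemma pv_bridgeB : ∀ k, k < 127 → consCode k = true → prevVowelB k = pvCode k := by decide

lemma toNat_ofNat_lt (n : Nat) (h : n < 127) : (Char.ofNat n).toNat = n := by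
  have hv : n.isValidChar := Or.inl (by omega)
  rw [Char.ofNat, dif_pos hv]
  simp [Char.ofNatAux, Char.toNat]

lemma clen_succ (g k s : Nat) :
    clen (g + 1) k s = if consCode k = true then clen g (nxtCode k s) (2 * s % 95) + 1 else 0 := rfl

lemma clen_le_fuel : ∀ f k s, clen f k s ≤ f := by
  intro f
  induction f with
  | zero => intro k s; simp [clen]
  | succ f ih =>
      intro k s
      rw [clen_succ]
      split
      · have := ih (nxtCode k s) (2 * s % 95); omega
      · omega

lemma clen_stable : ∀ f k s, clen f k s < f → clen (f + 1) k s = clen f k s := by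
  intro f
  induction f with
  | zero => intro k s h; simp [clen] at h
  | succ f ih =>
      intro k s h
      by_cases hc : consCode k = true
      · rw [clen_succ f k s, if_pos hc] at h
        rw [clen_succ (f + 1) k s, if_pos hc, clen_succ f k s, if_pos hc,
          ih (nxtCode k s) (2 * s % 95) (by omega)]
      · rw [clen_succ (f + 1) k s, if_neg hc, clen_succ f k s, if_neg hc]

lemma rank_step (k s : Nat) (hk : k < 127) (hs : s < 95) (hc : consCode k = true) :
    rank (nxtCode k s) (2 * s % 95) + 1 = rank k s := by
  have h10 : clen 10 k s ≤ 9 := clen_le9 k hk s hs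
  rw [clen_succ 9 k s, if_pos hc] at h10
  unfold rank
  rw [clen_succ 9 k s, if_pos hc, clen_stable 9 (nxtCode k s) (2 * s % 95) (by omega)]

lemma rankA_pos (k s : Nat) (hc : consCode k = true) : 0 < rank k s := by
  unfold rank
  rw [clen_succ 9 k s, if_pos hc]
  omega

lemma rankG_le10 (k s : Nat) : rankG k s ≤ 10 := by
  unfold rankG
  split
  · exact le_trans (clen_le_fuel 10 k s) (by omega)
  · omega

-- the A-side consonant test and vowel weight, named for the proof
def consT (c : Char) : Bool := !estVoyelleA c && PySem.Chars.isalpha c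
def vaddA (c : Char) : Nat := if estVoyelleA c then c.toNat else 0
def mkInsA (c : Char) (S : Nat) : Char := Char.ofNat ((getVoyelleA c + S) % 95 + 32)

lemma mkInsA_toNat (c : Char) (S : Nat) : (mkInsA c S).toNat = (getVoyelleA c + S) % 95 + 32 := by
  apply toNat_ofNat_lt; omega

lemma mkInsA_lt (c : Char) (S : Nat) : (mkInsA c S).toNat < 127 := by
  rw [mkInsA_toNat]; omega

lemma voyA_code (c : Char) (h : c.toNat < 127) : estVoyelleA c = voyCode c.toNat := by
  conv_lhs => rw [← Char.ofNat_toNat c]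
  exact voy_bridgeA c.toNat h

lemma alpha_code (c : Char) (h : c.toNat < 127) : PySem.Chars.isalpha c = alphaCode c.toNat := by
  conv_lhs => rw [← Char.ofNat_toNat c]
  exact alpha_bridge c.toNat h

lemma consT_bridge (c : Char) (h : c.toNat < 127) : consT c = consCode c.toNat := by
  unfold consT consCode
  rw [voyA_code c h, alpha_code c h, Bool.and_comm]

lemma voyB_eq_voyA (c : Char) (h : c.toNat < 127) : estVoyelleB c = estVoyelleA c := by
  rw [voyA_code c h]
  conv_lhs => rw [← Char.ofNat_toNat c]
  exact voy_bridgeB c.toNat h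

lemma getVoyelleA_code (c : Char) (h : c.toNat < 127) (hc : consCode c.toNat = true) :
    getVoyelleA c = pvCode c.toNat := by
  conv_lhs => rw [← Char.ofNat_toNat c]
  exact pv_bridgeA c.toNat h hc

lemma mkInsA_code (c : Char) (S : Nat) (h : c.toNat < 127) (hc : consCode c.toNat = true) :
    (mkInsA c S).toNat = nxtCode c.toNat (S % 95) := by
  rw [mkInsA_toNat, getVoyelleA_code c h hc]
  unfold nxtCode
  omega

lemma rankG_dec (c : Char) (S : Nat) (h : consT c = true) :
    rankG (mkInsA c S).toNat (2 * S % 95) < rankG c.toNat (S % 95) := by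
  have hm := mkInsA_lt c S
  have hs : S % 95 < 95 := Nat.mod_lt _ (by norm_num)
  by_cases hk : c.toNat < 127
  · have hc : consCode c.toNat = true := by rw [← consT_bridge c hk]; exact h
    unfold rankG
    rw [if_pos hm, if_pos hk, mkInsA_code c S hk hc]
    have hstep := rank_step c.toNat (S % 95) hk hs hc
    have e2 : 2 * S % 95 = 2 * (S % 95) % 95 := by omega
    rw [e2]
    omega
  · unfold rankG
    rw [if_pos hm, if_neg hk]
    have h9 : rank (mkInsA c S).toNat (2 * S % 95) ≤ 9 :=
      clen_le9 _ hm _ (Nat.mod_lt _ (by norm_num))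
    omega

-- one source character's whole emission chain, and the new running sum
def chainP (c : Char) (S : Nat) : List Char × Nat :=
  if h : consT c = true then
    (c :: (chainP (mkInsA c S) (2 * S)).1, (chainP (mkInsA c S) (2 * S)).2)
  else ([c], 2 * (S + vaddA c))
termination_by rankG c.toNat (S % 95)
decreasing_by exact rankG_dec c S h

def muP : List Char → Nat → Nat
  | [], _ => 0
  | c :: t, S => 11 * t.length + rankG c.toNat (S % 95) + 1

-- character-at-a-time processing of a (possibly mid-chain) suffix, A's loop seen on suffixes
def procS : List Char → Nat → List Char × Nat
  | [], S => ([], S)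
  | c :: t, S =>
      if h : consT c = true then
        ((c :: (procS (mkInsA c S :: t) (2 * S)).1), (procS (mkInsA c S :: t) (2 * S)).2)
      else ((c :: (procS t (2 * (S + vaddA c))).1), (procS t (2 * (S + vaddA c))).2)
termination_by rest S => muP rest S
decreasing_by
  · have := rankG_dec c S h
    simp only [muP]; omega
  · cases t with
    | nil => simp [muP]
    | cons c2 t2 =>
        have := rankG_le10 c2.toNat (2 * (S + vaddA c) % 95)
        simp only [muP, List.length_cons]; omega

-- per-source-character processing of a list, B's loop seen abstractly
def procL : List Char → Nat → List Char × Nat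
  | [], S => ([], S)
  | c :: t, S => ((chainP c S).1 ++ (procL t (chainP c S).2).1, (procL t (chainP c S).2).2)

-- sum characterization of mySomme
def termS (mot : List Char) (n i : Nat) : Nat :=
  if estVoyelleA (mot.getD i ' ') then (mot.getD i ' ').toNat * 2 ^ (n - i) else 0

lemma mySommeA_eq (mot : List Char) (n : Nat) :
    mySommeA mot n = ((List.range n).map (termS mot n)).sum := by
  unfold mySommeA
  by_cases hb : (n == 1 && estVoyelleA (mot.getD 0 ' ')) = true
  · rw [if_pos hb]
    obtain ⟨h1, hv⟩ := Bool.and_eq_true_iff.mp hb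
    have hn : n = 1 := by simpa using h1
    subst hn
    have hr : List.range 1 = [0] := rfl
    rw [hr]
    simp only [List.map_cons, List.map_nil, List.sum_cons, List.sum_nil, termS, hv, if_true]
    norm_num
  · rw [if_neg hb]
    have hcong : ∀ (acc : Nat), ∀ x ∈ (List.range n).reverse,
        (if estVoyelleA (mot.getD x ' ') then acc + (mot.getD x ' ').toNat * 2 ^ (n - x) else acc) =
          acc + termS mot n x := by
      intro acc x _
      simp only [termS]
      split <;> simp
    rw [PySem.List.foldl_congr_mem _ _ _ _ hcong, PySem.List.foldl_add_nat, List.map_reverse,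
      List.sum_reverse, Nat.zero_add]

lemma mySommeA_zero (mot : List Char) : mySommeA mot 0 = 0 := by
  rw [mySommeA_eq]; simp

lemma mySommeA_succ (mot : List Char) (n : Nat) :
    mySommeA mot (n + 1) = 2 * (mySommeA mot n + vaddA (mot.getD n ' ')) := by
  rw [mySommeA_eq, mySommeA_eq, List.range_succ, List.map_append, List.sum_append]
  have h1 : (([n].map (termS mot (n + 1))).sum) = 2 * vaddA (mot.getD n ' ') := by
    simp only [List.map_cons, List.map_nil, List.sum_cons, List.sum_nil, termS, vaddA]
    split_ifs
    · have e : n + 1 - n = 1 := by omega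
      rw [e, pow_one]; ring
    · simp
  have h2 : (List.range n).map (termS mot (n + 1)) = (List.range n).map (fun i => 2 * termS mot n i) := by
    apply List.map_congr_left
    intro i hi
    have hi' := List.mem_range.mp hi
    simp only [termS]
    split_ifs
    · have e : n + 1 - i = (n - i) + 1 := by omega
      rw [e, pow_succ]; ring
    · rfl
  rw [h1, h2, List.sum_map_mul_left]; ring

lemma mySommeA_congr (mot mot' : List Char) (n : Nat)
    (h : ∀ i, i < n → mot.getD i ' ' = mot'.getD i ' ') : mySommeA mot n = mySommeA mot' n := by
  rw [mySommeA_eq, mySommeA_eq]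
  congr 1
  apply List.map_congr_left
  intro i hi
  unfold termS
  rw [h i (List.mem_range.mp hi)]


lemma insert_eq (l : List Char) (n : Nat) (x : Char) (h : n ≤ l.length) :
    PySem.List.insert l (n : Int) x = l.take n ++ x :: l.drop n := by
  have h1 : (PySem.List.sliceIndices l.length (some (n : Int)) none 1).1 = (n : Int) := by
    simp [PySem.List.sliceIndices]; omega
  simp [PySem.List.insert, h1]

lemma procS_cons_pos (c : Char) (t : List Char) (S : Nat) : 0 < (procS (c :: t) S).1.length := by
  rw [procS]
  split <;> simp

-- A's loop computes procS on the remaining suffix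
lemma loopA_eq : ∀ f mot n, n ≤ mot.length →
    (procS (mot.drop n) (mySommeA mot n)).1.length ≤ f →
    loopA f mot n = mot.take n ++ (procS (mot.drop n) (mySommeA mot n)).1 := by
  intro f
  induction f with
  | zero =>
      intro mot n hn hlen
      by_cases h : n < mot.length
      · exfalso
        have hdrop : mot.drop n = mot[n] :: mot.drop (n + 1) := (List.getElem_cons_drop h).symm
        rw [hdrop] at hlen
        have := procS_cons_pos mot[n] (mot.drop (n + 1)) (mySommeA mot n)
        omega
      · have hnl : n = mot.length := by omega
        subst hnl
        simp [loopA, List.drop_length, procS]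
  | succ f ih =>
      intro mot n hn hlen
      simp only [loopA]
      by_cases h : n < mot.length
      · rw [dif_pos h]
        have hdrop : mot.drop n = mot[n] :: mot.drop (n + 1) := (List.getElem_cons_drop h).symm
        have hgetD : mot.getD n ' ' = mot[n] := List.getD_eq_getElem mot ' ' h
        have htakes : mot.take (n + 1) = mot.take n ++ [mot[n]] := by
          rw [List.take_add_one]
          simp [List.getElem?_eq_getElem h]
        by_cases hcons : (!estVoyelleA mot[n] && PySem.Chars.isalpha mot[n]) = true
        · rw [if_pos hcons]
          have hvoy : estVoyelleA mot[n] = false := by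
            rcases Bool.and_eq_true_iff.mp hcons with ⟨hv, _⟩
            simpa using hv
          have hmk : Char.ofNat ((getVoyelleA mot[n] + mySommeA mot n) % 95 + 32) =
              mkInsA mot[n] (mySommeA mot n) := rfl
          have hins : PySem.List.insert mot ((n : Int) + 1) (mkInsA mot[n] (mySommeA mot n)) =
              mot.take (n + 1) ++ mkInsA mot[n] (mySommeA mot n) :: mot.drop (n + 1) := by
            have e : ((n : Int) + 1) = ((n + 1 : Nat) : Int) := by push_cast; ring
            rw [e, insert_eq _ _ _ (by omega)]
          set mot' := mot.take (n + 1) ++ mkInsA mot[n] (mySommeA mot n) :: mot.drop (n + 1) with hmot'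
          have htklen : (mot.take (n + 1)).length = n + 1 := by
            rw [List.length_take]; omega
          have hlen' : mot.length + 1 = mot'.length := by
            rw [hmot', List.length_append, htklen, List.length_cons, List.length_drop]
            omega
          have htake' : mot'.take (n + 1) = mot.take (n + 1) := by
            rw [hmot', List.take_left' htklen]
          have hdrop' : mot'.drop (n + 1) = mkInsA mot[n] (mySommeA mot n) :: mot.drop (n + 1) := by
            rw [hmot', List.drop_left' htklen]
          have hget : ∀ i, i < n + 1 → mot'.getD i ' ' = mot.getD i ' ' := by
            intro i hi
            rw [List.getD_eq_getElem?_getD, List.getD_eq_getElem?_getD]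
            have e1 : mot'[i]? = (mot'.take (n + 1))[i]? := by
              rw [List.getElem?_take, if_pos hi]
            have e2 : mot[i]? = (mot.take (n + 1))[i]? := by
              rw [List.getElem?_take, if_pos hi]
            rw [e1, e2, htake']
          have hS1 : mySommeA mot' n = mySommeA mot n :=
            mySommeA_congr mot' mot n (fun i hi => hget i (by omega))
          have hgd : mot'.getD n ' ' = mot[n] := by rw [hget n (by omega), hgetD]
          have hS2 : mySommeA mot' (n + 1) = 2 * mySommeA mot n := by
            rw [mySommeA_succ, hS1, hgd]
            unfold vaddA
            rw [hvoy]
            simp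
          have hconsT : consT mot[n] = true := hcons
          have hproc : procS (mot.drop n) (mySommeA mot n) =
              ((mot[n] :: (procS (mkInsA mot[n] (mySommeA mot n) :: mot.drop (n + 1))
                  (2 * mySommeA mot n)).1),
                (procS (mkInsA mot[n] (mySommeA mot n) :: mot.drop (n + 1))
                  (2 * mySommeA mot n)).2) := by
            rw [hdrop, procS, dif_pos hconsT]
          rw [hmk, hins, ih mot' (n + 1) (by omega) ?hfuel]
          · rw [htake', hdrop', hS2, hproc, htakes]
            simp only [List.append_assoc, List.cons_append, List.nil_append]
          case hfuel =>
            rw [hdrop', hS2]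
            rw [hproc] at hlen
            simp only [List.length_cons] at hlen
            omega
        · rw [if_neg hcons]
          have hconsT : ¬ (consT mot[n] = true) := hcons
          have hS2 : mySommeA mot (n + 1) = 2 * (mySommeA mot n + vaddA mot[n]) := by
            rw [mySommeA_succ, hgetD]
          have hproc : procS (mot.drop n) (mySommeA mot n) =
              ((mot[n] :: (procS (mot.drop (n + 1)) (2 * (mySommeA mot n + vaddA mot[n]))).1),
                (procS (mot.drop (n + 1)) (2 * (mySommeA mot n + vaddA mot[n]))).2) := by
            rw [hdrop, procS, dif_neg hconsT]
          rw [ih mot (n + 1) (by omega) ?hfuel]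
          · rw [hS2, hproc, htakes]
            simp only [List.append_assoc, List.cons_append, List.nil_append]
          case hfuel =>
            rw [hS2]
            rw [hproc] at hlen
            simp only [List.length_cons] at hlen
            omega
      · rw [dif_neg h]
        have hnl : n = mot.length := by omega
        subst hnl
        simp [List.drop_length, procS]

lemma not_consT_of_rank0 (c : Char) (S : Nat) (hr : rankG c.toNat (S % 95) = 0) :
    ¬ (consT c = true) := by
  intro h
  by_cases hk : c.toNat < 127
  · rw [consT_bridge c hk] at h
    have := rankA_pos c.toNat (S % 95) h
    unfold rankG at hr
    rw [if_pos hk] at hr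
    omega
  · unfold rankG at hr
    rw [if_neg hk] at hr
    omega

-- chain flattening: procS eats one whole chain at a time
lemma procS_cons : ∀ r (c : Char) (S : Nat) t, rankG c.toNat (S % 95) ≤ r →
    procS (c :: t) S =
      ((chainP c S).1 ++ (procS t (chainP c S).2).1, (procS t (chainP c S).2).2) := by
  intro r
  induction r with
  | zero =>
      intro c S t hr
      have hcons := not_consT_of_rank0 c S (by omega)
      rw [procS, dif_neg hcons, chainP, dif_neg hcons]
      simp
  | succ r ih =>
      intro c S t hr
      by_cases hcons : consT c = true
      · rw [procS, dif_pos hcons, chainP, dif_pos hcons]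
        have hr' : rankG (mkInsA c S).toNat ((2 * S) % 95) ≤ r := by
          have := rankG_dec c S hcons
          omega
        rw [ih (mkInsA c S) (2 * S) t hr']
        simp
      · rw [procS, dif_neg hcons, chainP, dif_neg hcons]
        simp

lemma procS_eq_procL : ∀ (l : List Char) S, procS l S = procL l S := by
  intro l
  induction l with
  | nil => intro S; simp [procS, procL]
  | cons c t ih =>
      intro S
      rw [procS_cons (rankG c.toNat (S % 95)) c S t le_rfl]
      simp only [procL]
      rw [ih]

-- B's inner loop computes one chain
lemma chainB_eq : ∀ k (c : Char) (S : Nat) out, c.toNat < 127 → rank c.toNat (S % 95) < k →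
    chainB k out c (S % 95) = (out ++ (chainP c S).1, (chainP c S).2 % 95) := by
  intro k
  induction k with
  | zero => intro c S out hc hr; omega
  | succ k ih =>
      intro c S out hc hr
      by_cases hvoy : estVoyelleB c = true
      · have hva : estVoyelleA c = true := by rw [← voyB_eq_voyA c hc]; exact hvoy
        have hcons : ¬ (consT c = true) := by unfold consT; rw [hva]; simp
        simp only [chainB]
        rw [if_pos hvoy, chainP, dif_neg hcons]
        simp only [vaddA, hva, if_true, Prod.mk.injEq]
        exact ⟨trivial, by omega⟩
      · by_cases halpha : PySem.Chars.isalpha c = true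
        · have hvb : estVoyelleB c = false := by simpa using hvoy
          have hva : estVoyelleA c = false := by rw [← voyB_eq_voyA c hc]; exact hvb
          have hcons : consT c = true := by unfold consT; rw [hva, halpha]; rfl
          have hccode : consCode c.toNat = true := by rw [← consT_bridge c hc]; exact hcons
          simp only [chainB]
          rw [if_neg hvoy, if_neg (by rw [halpha]; simp : ¬ ((!PySem.Chars.isalpha c) = true))]
          have hchar : Char.ofNat ((prevVowelB c.toNat + S % 95) % 95 + 32) = mkInsA c S := by
            unfold mkInsA
            have e : (prevVowelB c.toNat + S % 95) % 95 + 32 = (getVoyelleA c + S) % 95 + 32 := by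
              rw [pv_bridgeB c.toNat hc hccode, getVoyelleA_code c hc hccode]
              omega
            rw [e]
          have hs2 : 2 * (S % 95) % 95 = 2 * S % 95 := by omega
          rw [hchar, hs2]
          have hstep := rank_step c.toNat (S % 95) hc (Nat.mod_lt _ (by norm_num)) hccode
          have hcode := mkInsA_code c S hc hccode
          conv_rhs => rw [chainP]
          rw [dif_pos hcons]
          rw [ih (mkInsA c S) (2 * S) (out ++ [c]) (mkInsA_lt c S)
            (by rw [hcode, ← hs2]; omega)]
          simp [List.append_assoc]
        · have half : PySem.Chars.isalpha c = false := by simpa using halpha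
          have hvb : estVoyelleB c = false := by simpa using hvoy
          have hva : estVoyelleA c = false := by rw [← voyB_eq_voyA c hc]; exact hvb
          have hcons : ¬ (consT c = true) := by unfold consT; rw [half]; simp
          simp only [chainB]
          rw [if_neg hvoy, if_pos (by rw [half]; rfl : (!PySem.Chars.isalpha c) = true)]
          rw [chainP, dif_neg hcons]
          simp only [vaddA, hva, Bool.false_eq_true, if_false, Prod.mk.injEq]
          exact ⟨trivial, by omega⟩

-- B's fold computes procL
lemma foldB_eq : ∀ (l : List Char) out S, (∀ c ∈ l, c.toNat < 127) →
    l.foldl (fun st c => chainB 10 st.1 c st.2) (out, S % 95) =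
      (out ++ (procL l S).1, (procL l S).2 % 95) := by
  intro l
  induction l with
  | nil => intro out S _; simp [procL]
  | cons c t ih =>
      intro out S h
      have hc : c.toNat < 127 := h c List.mem_cons_self
      have hr : rank c.toNat (S % 95) < 10 := by
        have := clen_le9 c.toNat hc (S % 95) (Nat.mod_lt _ (by norm_num))
        unfold rank
        omega
      simp only [List.foldl_cons]
      rw [chainB_eq 10 c S out hc hr,
        ih (out ++ (chainP c S).1) (chainP c S).2 (fun x hx => h x (List.mem_cons_of_mem _ hx))]
      simp [procL, List.append_assoc]

lemma chainP_len : ∀ (c : Char) (S : Nat),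
    (chainP c S).1.length ≤ rankG c.toNat (S % 95) + 1 := by
  intro c S
  induction c, S using chainP.induct with
  | case1 c S h ih =>
      rw [chainP, dif_pos h]
      have := rankG_dec c S h
      simp only [List.length_cons]
      omega
  | case2 c S h =>
      rw [chainP, dif_neg h]
      simp

lemma procL_len : ∀ (l : List Char) S, (procL l S).1.length ≤ 11 * l.length := by
  intro l
  induction l with
  | nil => intro S; simp [procL]
  | cons c t ih =>
      intro S
      simp only [procL, List.length_append, List.length_cons]
      have h1 := chainP_len c S
      have h2 := rankG_le10 c.toNat (S % 95)
      have h3 := ih (chainP c S).2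
      omega

-- ===== VERDICT (by name: the statement is the Claim_ definition above) =====
theorem regle4_spec : Claim_equal_regle4 := by
  intro mot hdom
  show regle4 mot = regle4_alt mot
  have hchars : ∀ c ∈ mot.toList, c.toNat < 127 := by
    intro c hcmem
    unfold Dom_regle4 pvDomStr at hdom
    have := List.all_eq_true.mp hdom c hcmem
    unfold pvDomChar at this
    simp at this
    omega
  have h0 : mySommeA mot.toList 0 = 0 := mySommeA_zero _
  have hA : loopA (11 * mot.toList.length + 11) mot.toList 0 = (procS mot.toList 0).1 := by
    have hlen : (procS (mot.toList.drop 0) (mySommeA mot.toList 0)).1.length ≤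
        11 * mot.toList.length + 11 := by
      rw [List.drop_zero, h0, procS_eq_procL]
      have := procL_len mot.toList 0
      omega
    have := loopA_eq (11 * mot.toList.length + 11) mot.toList 0 (by omega) hlen
    rw [List.drop_zero, h0, List.take_zero] at this
    simpa using this
  have hB : (mot.toList.foldl (fun (st : List Char × Nat) c => chainB 10 st.1 c st.2) ([], 0)).1 =
      (procL mot.toList 0).1 := by
    rw [show (([], 0) : List Char × Nat) = (([] : List Char), 0 % 95) from rfl]
    rw [foldB_eq mot.toList [] 0 hchars]
    simp
  unfold regle4 regle4_alt
  rw [hA, hB, procS_eq_procL]
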